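-- pv_equiv track=rewrite | github.com/Wangmengguo/poker-teaching-v1-alpha | packages/poker_core/suggest/service.py | _replace_facing
-- ===== SOURCE A (Python) =====
-- def _replace_facing(node_key: str, new_tag: str) -> str:
--     parts = node_key.split("|")
--     for idx, part in enumerate(parts):
--         if part.startswith("facing="):
--             updated = parts.copy()
--             updated[idx] = f"facing={new_tag}"
--             return "|".join(updated)
--     # fallback：若键没有 facing 段，直接追加
--     return "|".join([node_key, f"facing={new_tag}"])
-- ===== SOURCE B (Python) =====
-- def _replace_facing(node_key: str, new_tag: str) -> str:
--     # single scan with find/slicing instead of split/copy/join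
--     repl = "facing=" + new_tag
--     i = 0
--     while True:
--         if node_key.startswith("facing=", i):
--             end = node_key.find("|", i)
--             if end < 0:
--                 end = len(node_key)
--             return node_key[:i] + repl + node_key[end:]
--         nxt = node_key.find("|", i)
--         if nxt < 0:
--             return node_key + "|" + repl
--         i = nxt + 1
-- ===== Notes on version B (the rewrite author's own statement) =====
-- stated objective: alternative
-- what changed: B replaces A's split('|') / list copy / join pipeline by a single left-to-right scan that locates the facing= segment with startswith/find and splices the replacement in with string slicing, never materialising the parts list.
import Mathlib
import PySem

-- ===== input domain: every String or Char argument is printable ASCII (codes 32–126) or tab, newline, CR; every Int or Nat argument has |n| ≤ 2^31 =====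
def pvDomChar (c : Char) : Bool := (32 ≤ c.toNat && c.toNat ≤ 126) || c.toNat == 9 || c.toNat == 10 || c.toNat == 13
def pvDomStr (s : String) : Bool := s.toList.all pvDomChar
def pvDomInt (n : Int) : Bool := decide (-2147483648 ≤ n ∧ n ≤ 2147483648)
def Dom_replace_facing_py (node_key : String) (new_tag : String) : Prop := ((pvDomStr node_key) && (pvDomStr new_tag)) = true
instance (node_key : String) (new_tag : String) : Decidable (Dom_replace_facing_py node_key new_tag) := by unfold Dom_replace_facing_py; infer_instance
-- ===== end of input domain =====

-- B replaces A's split/copy/join over the parts list by a single left-to-right scan with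
-- startswith/find and slice splicing (objective: alternative; same asymptotic cost).

-- ===== PORT A =====
-- the 'for idx, part in enumerate(parts)' loop; 'done' is the list of parts already passed
-- (so idx = done.length and 'updated = parts.copy(); updated[idx] = repl' is done ++ repl :: rest)
def pvALoop (repl : List Char) : List (List Char) → List (List Char) → Option (List Char)
  | _, [] => none
  | done, p :: rest =>
    if PySem.Chars.startswith p "facing=".toList then
      some (PySem.Chars.join ['|'] (done ++ repl :: rest))
    else pvALoop repl (done ++ [p]) rest

def replace_facing_py (node_key : String) (new_tag : String) : String :=
  let s := node_key.toList
  let repl := "facing=".toList ++ new_tag.toList     -- f"facing={new_tag}"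
  let parts := PySem.Chars.splitOn s ['|']           -- node_key.split("|")
  match pvALoop repl [] parts with
  | some out => String.ofList out
  | none => String.ofList (PySem.Chars.join ['|'] [s, repl])   -- "|".join([node_key, …])

-- ===== PORT B =====
-- the while loop of Source B: pre = node_key[:i], rest = node_key[i:]; 'find("|", i)' is the
-- takeWhile/dropWhile split of rest at its first '|'
def pvBGo (nk repl : List Char) (pre rest : List Char) : List Char :=
  if PySem.Chars.startswith rest "facing=".toList then
    pre ++ repl ++ rest.dropWhile (· ≠ '|')          -- node_key[:i] + repl + node_key[end:]
  else
    match _h : rest.dropWhile (· ≠ '|') with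
    | [] => nk ++ '|' :: repl                        -- node_key + "|" + repl
    | _ :: tail => pvBGo nk repl (pre ++ rest.takeWhile (· ≠ '|') ++ ['|']) tail
termination_by rest.length
decreasing_by
  have hle := List.length_dropWhile_le (p := fun c => decide (c ≠ '|')) (l := rest)
  simp only [_h, List.length_cons] at hle
  omega

def replace_facing_py_alt (node_key : String) (new_tag : String) : String :=
  String.ofList (pvBGo node_key.toList ("facing=".toList ++ new_tag.toList) [] node_key.toList)

-- ===== PRECONDITION & SPEC =====
def Spec_replace_facing_py (node_key : String) (new_tag : String) (out : String) : Prop := out = replace_facing_py_alt node_key new_tag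
instance (node_key : String) (new_tag : String) (out : String) : Decidable (Spec_replace_facing_py node_key new_tag out) := by unfold Spec_replace_facing_py; infer_instance

-- ===== CLAIM (what is proved, stated in full; the proofs are below) =====
def Claim_equal_replace_facing_py : Prop := ∀ (node_key : String) (new_tag : String), Dom_replace_facing_py node_key new_tag → Spec_replace_facing_py node_key new_tag (replace_facing_py node_key new_tag)

-- ===== LEMMAS AND PROOFS =====

def pvSplit : List Char → List (List Char)
  | [] => [[]]
  | c :: cs => if c = '|' then [] :: pvSplit cs else (pvSplit cs).modifyHead (c :: ·)

theorem pvALoop_nil (repl : List Char) (done : List (List Char)) : pvALoop repl done [] = none := rfl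

theorem pvALoop_cons (repl p : List Char) (done rest : List (List Char)) :
    pvALoop repl done (p :: rest) =
      if PySem.Chars.startswith p "facing=".toList then
        some (PySem.Chars.join ['|'] (done ++ repl :: rest))
      else pvALoop repl (done ++ [p]) rest := rfl

theorem pv_go_eq (fuel : Nat) :
    ∀ (l cur : List Char) (accs : List (List Char)), l.length < fuel →
      PySem.Chars.splitOn.go ['|'] fuel l cur accs = accs.reverse ++ (pvSplit l).modifyHead (cur.reverse ++ ·) := by
  induction fuel with
  | zero => intro l cur accs h; omega
  | succ fuel ih =>
    intro l cur accs h
    cases l with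
    | nil => simp [PySem.Chars.splitOn.go, pvSplit, List.modifyHead]
    | cons c rest =>
      rw [PySem.Chars.splitOn.go]
      by_cases hc : c = '|'
      · subst hc
        have hpre : List.isPrefixOf ['|'] ('|' :: rest) = true := by simp [List.isPrefixOf]
        rw [if_pos hpre]
        simp only [List.length_cons] at h
        rw [ih _ _ _ (by simp; omega)]
        simp only [pvSplit]
        cases hs : pvSplit rest <;> simp [List.modifyHead, hs]
      · have hpre : List.isPrefixOf ['|'] (c :: rest) = false := by
          simp [List.isPrefixOf]
          intro hcc; exact absurd hcc.symm hc
        rw [if_neg (by simp [hpre])]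
        simp only [List.length_cons] at h
        rw [ih _ _ _ (by omega)]
        simp only [pvSplit, if_neg hc]
        cases hs : pvSplit rest with
        | nil => simp [List.modifyHead]
        | cons a t => simp [List.modifyHead]

theorem pv_splitOn_bar (s : List Char) : PySem.Chars.splitOn s ['|'] = pvSplit s := by
  unfold PySem.Chars.splitOn
  rw [pv_go_eq _ _ _ _ (by omega)]
  cases h : pvSplit s <;> simp [List.modifyHead]

theorem pvSplit_ne_nil (s : List Char) : pvSplit s ≠ [] := by
  induction s with
  | nil => simp [pvSplit]
  | cons c cs ih =>
    simp only [pvSplit]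
    split
    · simp
    · cases h : pvSplit cs with
      | nil => exact absurd h ih
      | cons a t => simp [List.modifyHead]

theorem pv_intercalate_cons_cons (sep a b : List Char) (t : List (List Char)) :
    List.intercalate sep (a :: b :: t) = a ++ sep ++ List.intercalate sep (b :: t) := by
  simp [List.intercalate, List.intersperse]

theorem pv_join_pvSplit (s : List Char) : List.intercalate ['|'] (pvSplit s) = s := by
  induction s with
  | nil => simp [pvSplit, List.intercalate]
  | cons c cs ih =>
    by_cases hc : c = '|'
    · subst hc
      simp only [pvSplit, if_pos rfl]
      cases h : pvSplit cs with
      | nil => exact absurd h (pvSplit_ne_nil cs)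
      | cons a t =>
        rw [← h, if_pos trivial]
        rw [show ([] : List Char) :: pvSplit cs = [] :: a :: t from by rw [h]]
        rw [pv_intercalate_cons_cons, ← h, ih]
        simp
    · simp only [pvSplit, if_neg hc]
      cases h : pvSplit cs with
      | nil => exact absurd h (pvSplit_ne_nil cs)
      | cons a t =>
        rw [h] at ih
        cases t with
        | nil => simp_all [List.intercalate, List.modifyHead]
        | cons b t' =>
          simp only [List.modifyHead]
          rw [pv_intercalate_cons_cons] at ih ⊢
          simp_all

theorem pv_intercalate_append (done : List (List Char)) (L : List (List Char)) (hL : L ≠ []) :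
    List.intercalate ['|'] (done ++ L) =
      (done.map (· ++ ['|'])).flatten ++ List.intercalate ['|'] L := by
  induction done with
  | nil => simp
  | cons d ds ih =>
    cases hds : ds ++ L with
    | nil => simp_all
    | cons x xs =>
      rw [List.cons_append, hds, pv_intercalate_cons_cons, ← hds, ih]
      simp

theorem pv_prefix_takeWhile (p : List Char) (r : List Char) (h : p <+: r)
    (hp : ∀ c ∈ p, c ≠ '|') : p <+: r.takeWhile (· ≠ '|') := by
  induction p generalizing r with
  | nil => simp
  | cons a p' ih =>
    obtain ⟨t, rfl⟩ := h
    have ha : a ≠ '|' := hp a (by simp)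
    rw [List.cons_append, List.takeWhile_cons, if_pos (by simpa using ha)]
    exact (List.cons_prefix_cons).2 ⟨rfl, ih (p' ++ t) ⟨t, rfl⟩ (fun c hc => hp c (by simp [hc]))⟩

theorem pvSplit_shape (s : List Char) :
    pvSplit s = s.takeWhile (· ≠ '|') ::
      (match s.dropWhile (· ≠ '|') with
        | [] => []
        | _ :: t => pvSplit t) := by
  induction s with
  | nil => simp [pvSplit]
  | cons c cs ih =>
    by_cases hc : c = '|'
    · subst hc
      simp [pvSplit, List.dropWhile_cons]
    · simp only [pvSplit, if_neg hc, ih, List.takeWhile_cons, List.dropWhile_cons,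
        decide_eq_true_eq, hc, not_false_iff, if_true, List.modifyHead]
      simp [hc]

theorem pvSplit_of_drop_nil (r : List Char) (hd : r.dropWhile (· ≠ '|') = []) :
    pvSplit r = [r.takeWhile (· ≠ '|')] := by
  rw [pvSplit_shape r, hd]

theorem pvSplit_of_drop_cons (r : List Char) (c : Char) (tail : List Char)
    (hd : r.dropWhile (· ≠ '|') = c :: tail) :
    pvSplit r = r.takeWhile (· ≠ '|') :: pvSplit tail := by
  rw [pvSplit_shape r, hd]

theorem pv_drop_head_bar (r : List Char) (c : Char) (tail : List Char)
    (hd : r.dropWhile (· ≠ '|') = c :: tail) : c = '|' := by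
  induction r with
  | nil => simp at hd
  | cons x xs ih =>
    rw [List.dropWhile_cons] at hd
    by_cases hx : x ≠ '|'
    · rw [if_pos (by simpa using hx)] at hd
      exact ih hd
    · rw [if_neg (by simpa using hx)] at hd
      cases hd
      simpa using hx

theorem pv_main (nk repl : List Char) :
    ∀ (n : Nat) (r : List Char) (done : List (List Char)), r.length ≤ n →
      pvBGo nk repl ((done.map (· ++ ['|'])).flatten) r =
        (match pvALoop repl done (pvSplit r) with
          | some out => out
          | none => nk ++ '|' :: repl) := by
  intro n
  induction n with
  | zero =>
    intro r done h
    have : r = [] := List.length_eq_zero_iff.mp (by omega)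
    subst this
    rw [pvBGo]
    rw [if_neg (by decide)]
    rw [pvSplit_shape]
    simp only [List.takeWhile_nil, List.dropWhile_nil]
    rw [pvALoop_cons, if_neg (by decide), pvALoop_nil]
  | succ n ih =>
    intro r done h
    rw [pvBGo]
    by_cases hF : PySem.Chars.startswith r "facing=".toList
    · rw [if_pos hF]
      have hFr : "facing=".toList <+: r := (PySem.Chars.startswith_iff _ _).1 hF
      have hFseg : PySem.Chars.startswith (r.takeWhile (· ≠ '|')) "facing=".toList := by
        rw [PySem.Chars.startswith_iff]
        exact pv_prefix_takeWhile _ _ hFr (by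
          intro ch hch
          have : "facing=".toList = ['f', 'a', 'c', 'i', 'n', 'g', '='] := rfl
          rw [this] at hch
          fin_cases hch <;> decide)
      cases hd : r.dropWhile (· ≠ '|') with
      | nil =>
        rw [pvSplit_of_drop_nil r hd, pvALoop_cons, if_pos hFseg]
        rw [PySem.Chars.join]
        rw [pv_intercalate_append _ _ (by simp)]
        simp [List.intercalate]
      | cons c tail =>
        have hc : c = '|' := pv_drop_head_bar r c tail hd
        subst hc
        rw [pvSplit_of_drop_cons r '|' tail hd, pvALoop_cons, if_pos hFseg]
        rw [PySem.Chars.join]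
        rw [pv_intercalate_append _ _ (by simp)]
        cases hs : pvSplit tail with
        | nil => exact absurd hs (pvSplit_ne_nil tail)
        | cons a t =>
          rw [pv_intercalate_cons_cons, ← hs, pv_join_pvSplit]
          simp
    · rw [if_neg hF]
      have hseg : ¬ PySem.Chars.startswith (r.takeWhile (· ≠ '|')) "facing=".toList = true := by
        intro hcon
        apply hF
        rw [PySem.Chars.startswith_iff] at hcon ⊢
        exact hcon.trans (List.takeWhile_prefix _)
      cases hd : r.dropWhile (· ≠ '|') with
      | nil =>
        rw [pvSplit_of_drop_nil r hd]
        rw [pvALoop_cons, if_neg (by simpa using hseg), pvALoop_nil]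
      | cons c tail =>
        have hc : c = '|' := pv_drop_head_bar r c tail hd
        subst hc
        rw [pvSplit_of_drop_cons r '|' tail hd]
        rw [pvALoop_cons, if_neg (by simpa using hseg)]
        have hlen : tail.length ≤ n := by
          have hle := List.length_dropWhile_le (p := fun c => decide (c ≠ '|')) (l := r)
          rw [hd] at hle
          simp at hle
          omega
        have := ih tail (done ++ [r.takeWhile (· ≠ '|')]) hlen
        simp only [List.map_append, List.flatten_append, List.map_cons, List.map_nil,
          List.flatten_cons, List.flatten_nil, List.append_nil] at this
        rw [← List.append_assoc] at this
        exact this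

theorem pv_final (nk tag : String) : replace_facing_py nk tag = replace_facing_py_alt nk tag := by
  simp only [replace_facing_py, replace_facing_py_alt]
  rw [pv_splitOn_bar]
  have hm := pv_main nk.toList ("facing=".toList ++ tag.toList) nk.toList.length nk.toList []
    (le_refl _)
  simp only [List.map_nil, List.flatten_nil] at hm
  rw [hm]
  cases hA : pvALoop ("facing=".toList ++ tag.toList) [] (pvSplit nk.toList) with
  | some out => simp
  | none =>
    simp only []
    rw [PySem.Chars.join, pv_intercalate_cons_cons]
    simp [List.intercalate]

-- ===== VERDICT (by name: the statement is the Claim_ definition above) =====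
theorem replace_facing_py_spec : Claim_equal_replace_facing_py := by
  intro node_key new_tag _
  unfold Spec_replace_facing_py
  exact pv_final node_key new_tag
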